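-- pv_equiv track=rewrite | github.com/yaseralshmeri/des_project | cyber_security/middleware.py | _determine_event_type
-- ===== SOURCE A (Python) =====
-- def _determine_event_type(threat_analysis) -> str:
--     """تحديد نوع الحدث الأمني"""
--
--     threats = threat_analysis.get('threats_detected', [])
--
--     if not threats:
--         return 'suspicious_activity'
--
--     # البحث عن أخطر نوع تهديد
--     threat_types = []
--     for threat in threats:
--         if isinstance(threat, dict):
--             threat_types.append(threat.get('threat_type', 'unknown'))
--
--     if 'sql_injection' in threat_types:
--         return 'sql_injection'
--     elif 'xss_attempt' in threat_types:
--         return 'xss_attempt'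
--     elif 'command_injection' in threat_types:
--         return 'command_injection'
--     elif 'path_traversal' in threat_types:
--         return 'path_traversal'
--     elif 'brute_force_attempt' in threat_types:
--         return 'brute_force'
--     else:
--         return 'suspicious_activity'
-- ===== SOURCE B (Python) =====
-- _RANK = {
--     'sql_injection': 0,
--     'xss_attempt': 1,
--     'command_injection': 2,
--     'path_traversal': 3,
--     'brute_force_attempt': 4,
-- }
--
-- _LABELS = ['sql_injection', 'xss_attempt', 'command_injection',
--            'path_traversal', 'brute_force', 'suspicious_activity']
--
--
-- def _determine_event_type(threat_analysis) -> str: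
--     """Single pass keeping the lowest (most severe) priority rank seen."""
--     best = 5
--     for threat in threat_analysis.get('threats_detected', []):
--         if isinstance(threat, dict):
--             r = _RANK.get(threat.get('threat_type', 'unknown'), 5)
--             if r < best:
--                 best = r
--     return _LABELS[best]
-- ===== Notes on version B (the rewrite author's own statement) =====
-- stated objective: simpler
-- what changed: Replaces the intermediate threat_types list plus five sequential membership scans with a rank table and one pass over threats keeping the minimal severity rank; the empty-list guard disappears because the default rank already yields 'suspicious_activity'.
import Mathlib
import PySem

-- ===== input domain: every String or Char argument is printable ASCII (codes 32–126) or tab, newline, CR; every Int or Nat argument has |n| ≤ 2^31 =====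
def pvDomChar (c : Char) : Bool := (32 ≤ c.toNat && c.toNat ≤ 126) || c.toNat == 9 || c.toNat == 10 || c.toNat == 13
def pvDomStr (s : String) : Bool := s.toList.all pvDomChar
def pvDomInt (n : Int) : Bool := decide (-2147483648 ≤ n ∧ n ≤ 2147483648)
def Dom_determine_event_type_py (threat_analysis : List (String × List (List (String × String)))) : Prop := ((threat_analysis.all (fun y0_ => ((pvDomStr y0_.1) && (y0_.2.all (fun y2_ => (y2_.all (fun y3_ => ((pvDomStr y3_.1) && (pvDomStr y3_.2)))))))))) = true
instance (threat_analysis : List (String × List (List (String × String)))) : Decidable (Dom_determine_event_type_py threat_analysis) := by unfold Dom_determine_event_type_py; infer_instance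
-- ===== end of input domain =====

-- B replaces the rebuilt type list plus five membership scans by a rank table and one
-- min-rank pass over the threats (objective: simpler).

-- ===== PORT A =====
-- every threat in the Lean type is a dict, so Python's `isinstance(threat, dict)` is always true
def determine_event_type_py (threat_analysis : List (String × List (List (String × String)))) : String :=
  let threats := (PySem.Dict.mk threat_analysis).getD "threats_detected" []
  if threats = [] then "suspicious_activity"
  else
    let threat_types := threats.foldl
      (fun acc threat => acc ++ [(PySem.Dict.mk threat).getD "threat_type" "unknown"]) []
    if threat_types.contains "sql_injection" then "sql_injection"
    else if threat_types.contains "xss_attempt" then "xss_attempt"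
    else if threat_types.contains "command_injection" then "command_injection"
    else if threat_types.contains "path_traversal" then "path_traversal"
    else if threat_types.contains "brute_force_attempt" then "brute_force"
    else "suspicious_activity"

-- ===== PORT B =====
def pvRank : PySem.Dict String Nat :=
  PySem.Dict.mk [("sql_injection", 0), ("xss_attempt", 1), ("command_injection", 2),
                 ("path_traversal", 3), ("brute_force_attempt", 4)]

def pvLabels : List String :=
  ["sql_injection", "xss_attempt", "command_injection",
   "path_traversal", "brute_force", "suspicious_activity"]

def determine_event_type_py_alt (threat_analysis : List (String × List (List (String × String)))) : String :=
  let best := ((PySem.Dict.mk threat_analysis).getD "threats_detected" []).foldl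
    (fun best threat =>
      let r := pvRank.getD ((PySem.Dict.mk threat).getD "threat_type" "unknown") 5
      if r < best then r else best) 5
  -- `best ≤ 5 < 6 = pvLabels.length`, so `getD` is exact for Python's `_LABELS[best]`
  pvLabels.getD best "suspicious_activity"

-- ===== PRECONDITION & SPEC =====
def Spec_determine_event_type_py (threat_analysis : List (String × List (List (String × String)))) (out : String) : Prop := out = determine_event_type_py_alt threat_analysis
instance (threat_analysis : List (String × List (List (String × String)))) (out : String) : Decidable (Spec_determine_event_type_py threat_analysis out) := by unfold Spec_determine_event_type_py; infer_instance

-- ===== CLAIM (what is proved, stated in full; the proofs are below) =====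
def Claim_equal_determine_event_type_py : Prop := ∀ (threat_analysis : List (String × List (List (String × String)))), Dom_determine_event_type_py threat_analysis → Spec_determine_event_type_py threat_analysis (determine_event_type_py threat_analysis)

-- ===== LEMMAS AND PROOFS =====

-- rank lookup as an if-chain
theorem pvRank_getD (ty : String) :
    pvRank.getD ty 5 =
      if ty = "sql_injection" then 0 else if ty = "xss_attempt" then 1
      else if ty = "command_injection" then 2 else if ty = "path_traversal" then 3
      else if ty = "brute_force_attempt" then 4 else 5 := by
  rcases eq_or_ne ty "sql_injection" with rfl | h0
  · decide
  rcases eq_or_ne ty "xss_attempt" with rfl | h1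
  · decide
  rcases eq_or_ne ty "command_injection" with rfl | h2
  · decide
  rcases eq_or_ne ty "path_traversal" with rfl | h3
  · decide
  rcases eq_or_ne ty "brute_force_attempt" with rfl | h4
  · decide
  simp [pvRank, PySem.Dict.getD_eq_get?_getD, PySem.Dict.get?, beq_iff_eq,
        Ne.symm h0, Ne.symm h1, Ne.symm h2, Ne.symm h3, Ne.symm h4, h0, h1, h2, h3, h4]

theorem pvRank_le (ty : String) : pvRank.getD ty 5 ≤ 5 := by
  rw [pvRank_getD]; split_ifs <;> omega

-- B's step keeps the minimum
theorem pvStep_eq_min (b : Nat) (ty : String) :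
    (if pvRank.getD ty 5 < b then pvRank.getD ty 5 else b) = min b (pvRank.getD ty 5) := by
  split_ifs <;> omega

-- accumulator lemma for B's fold (in min form) over a list of type strings
theorem pvFold_acc (ys : List String) : ∀ b : Nat, b ≤ 5 →
    ys.foldl (fun b ty => min b (pvRank.getD ty 5)) b
      = min b (ys.foldl (fun b ty => min b (pvRank.getD ty 5)) 5) := by
  induction ys with
  | nil => intro b hb; simp; omega
  | cons ty ys ih =>
    intro b hb
    have hr := pvRank_le ty
    simp only [List.foldl_cons]
    rw [ih (min b (pvRank.getD ty 5)) (by omega), ih (min 5 (pvRank.getD ty 5)) (by omega)]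
    omega

-- closed form of B's minimal rank in terms of membership
theorem pvFold_eq (ys : List String) :
    ys.foldl (fun b ty => min b (pvRank.getD ty 5)) 5
      = if "sql_injection" ∈ ys then 0 else if "xss_attempt" ∈ ys then 1
        else if "command_injection" ∈ ys then 2 else if "path_traversal" ∈ ys then 3
        else if "brute_force_attempt" ∈ ys then 4 else 5 := by
  induction ys with
  | nil => simp
  | cons ty ys ih =>
    have hr := pvRank_le ty
    simp only [List.foldl_cons]
    rw [pvFold_acc ys (min 5 (pvRank.getD ty 5)) (by omega), ih, pvRank_getD]
    simp only [List.mem_cons]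
    by_cases h0 : ty = "sql_injection" <;> by_cases h1 : ty = "xss_attempt" <;>
      by_cases h2 : ty = "command_injection" <;> by_cases h3 : ty = "path_traversal" <;>
      by_cases h4 : ty = "brute_force_attempt" <;>
      simp_all <;> split_ifs <;> simp_all

-- ===== VERDICT (by name: the statement is the Claim_ definition above) =====
theorem determine_event_type_py_spec : Claim_equal_determine_event_type_py := by
  intro ta _
  unfold Spec_determine_event_type_py determine_event_type_py determine_event_type_py_alt
  simp only [PySem.List.foldl_append_singleton_eq_map, List.nil_append]
  set ts := (PySem.Dict.mk ta).getD "threats_detected" [] with hts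
  have hfold :
      ts.foldl (fun b threat =>
          if pvRank.getD ((PySem.Dict.mk threat).getD "threat_type" "unknown") 5 < b
          then pvRank.getD ((PySem.Dict.mk threat).getD "threat_type" "unknown") 5 else b) 5
        = (ts.map (fun threat => (PySem.Dict.mk threat).getD "threat_type" "unknown")).foldl
            (fun b ty => if pvRank.getD ty 5 < b then pvRank.getD ty 5 else b) 5 := by
    rw [List.foldl_map]
  rw [hfold]
  simp only [pvStep_eq_min]
  rw [pvFold_eq]
  by_cases hempty : ts = []
  · simp [hempty, pvLabels]
  · simp only [hempty, if_false]
    simp only [List.contains_iff_mem]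
    split_ifs <;> rfl
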